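-- pv_equiv track=rewrite | github.com/Baiyu6666/CHMM | methods/hmm_backend.py | _count_free_trans_params
-- ===== SOURCE A (Python) =====
-- def _count_free_trans_params(K: int, left_right: bool) -> int:
--     """转移矩阵自由参数数（不含初始分布）。"""
--     if not left_right:
--         # 每行有 K-1 个自由度（行和=1）
--         return K * (K - 1)
--     # 左→右：第 i 行只允许 i->i 和 i->i+1（最后一行只有自环）
--     # 每行自由度 = (允许的出边数 - 1)
--     free = 0
--     for i in range(K):
--         allowed = 1 + (1 if i + 1 < K else 0)
--         free += max(allowed - 1, 0)
--     return free
-- ===== SOURCE B (Python) =====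
-- def _count_free_trans_params(K: int, left_right: bool) -> int:
--     if not left_right:
--         return K * (K - 1)
--     # left-to-right: every row except the last has exactly one free parameter
--     return max(K - 1, 0)
-- ===== Notes on version B (the rewrite author's own statement) =====
-- stated objective: simpler
-- what changed: Replaces the accumulation loop of the left_right branch with the closed form max(K-1, 0).
import Mathlib
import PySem

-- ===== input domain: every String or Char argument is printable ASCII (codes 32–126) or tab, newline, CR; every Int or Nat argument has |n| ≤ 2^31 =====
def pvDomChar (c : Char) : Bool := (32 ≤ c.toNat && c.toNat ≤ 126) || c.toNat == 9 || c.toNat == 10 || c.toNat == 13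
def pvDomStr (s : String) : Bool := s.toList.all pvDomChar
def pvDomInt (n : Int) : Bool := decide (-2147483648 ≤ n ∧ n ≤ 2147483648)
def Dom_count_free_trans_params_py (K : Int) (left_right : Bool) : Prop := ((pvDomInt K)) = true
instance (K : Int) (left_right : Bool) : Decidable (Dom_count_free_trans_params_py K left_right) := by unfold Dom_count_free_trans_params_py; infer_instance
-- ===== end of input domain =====

-- B replaces the left_right-branch loop of A by the closed form max(K-1, 0); equal on all inputs.


-- ===== PORT A =====
def count_free_trans_params_py (K : Int) (left_right : Bool) : Int :=
  if !left_right then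
    K * (K - 1)
  else
    (PySem.List.pyRange 0 K 1).foldl
      (fun free i =>
        let allowed : Int := 1 + (if i + 1 < K then 1 else 0)
        free + max (allowed - 1) 0)
      0

-- ===== PORT B =====
def count_free_trans_params_py_alt (K : Int) (left_right : Bool) : Int :=
  if !left_right then
    K * (K - 1)
  else
    max (K - 1) 0

-- ===== PRECONDITION & SPEC =====
def Spec_count_free_trans_params_py (K : Int) (left_right : Bool) (out : Int) : Prop := out = count_free_trans_params_py_alt K left_right
instance (K : Int) (left_right : Bool) (out : Int) : Decidable (Spec_count_free_trans_params_py K left_right out) := by unfold Spec_count_free_trans_params_py; infer_instance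

-- ===== CLAIM (what is proved, stated in full; the proofs are below) =====
def Claim_equal_count_free_trans_params_py : Prop := ∀ (K : Int) (left_right : Bool), Dom_count_free_trans_params_py K left_right → Spec_count_free_trans_params_py K left_right (count_free_trans_params_py K left_right)

-- ===== LEMMAS AND PROOFS =====

lemma cftp_loop_sum (K : Int) :
    (PySem.List.pyRange 0 K 1).foldl
      (fun free i =>
        let allowed : Int := 1 + (if i + 1 < K then 1 else 0)
        free + max (allowed - 1) 0)
      0 = max (K - 1) 0 := by
  simp only
  rw [PySem.List.foldl_add]
  by_cases hK : K ≤ 0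
  case pos =>
    rw [PySem.List.pyRange_one_eq_nil (by omega)]
    simp; omega
  case neg =>
    have hsplit : PySem.List.pyRange 0 K 1 =
        PySem.List.pyRange 0 (K - 1) 1 ++ [K - 1] := by
      rw [PySem.List.pyRange_one_append 0 (K - 1) K (by omega) (by omega)]
      congr 1
      have h := PySem.List.pyRange_one_singleton (K - 1)
      rw [show (K - 1) + 1 = K by ring] at h
      exact h
    rw [hsplit, List.map_append, List.sum_append]
    have hmap : (PySem.List.pyRange 0 (K - 1) 1).map
        (fun i => max (1 + (if i + 1 < K then 1 else 0) - 1) 0)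
        = (PySem.List.pyRange 0 (K - 1) 1).map (fun _ => (1 : Int)) := by
      apply List.map_congr_left
      intro i hi
      rw [PySem.List.mem_pyRange_one] at hi
      rw [if_pos (by omega)]; decide
    rw [hmap]
    simp [PySem.List.length_pyRange_one]
    omega

-- ===== VERDICT (by name: the statement is the Claim_ definition above) =====
theorem count_free_trans_params_py_spec : Claim_equal_count_free_trans_params_py := by
  intro K lr _
  unfold Spec_count_free_trans_params_py count_free_trans_params_py count_free_trans_params_py_alt
  cases lr with
  | false => rfl
  | true => simpa using cftp_loop_sum K
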